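-- pv_equiv track=rewrite | github.com/alarxx/KMGLift | prod/algo/predictor.py | __operations_time
-- ===== SOURCE A (Python) =====
-- def __operations_time(values):
--     operations = []
--
--     # Сложнаватая логика, пересмотреть!
--     isClose = True
--     start = 0
--     for i in range(len(values)):
--         if values[i] == 0:
--             if not isClose:
--                 operations.append((start, i))
--             isClose = True
--         elif isClose:
--             isClose = False
--             start = i
--
--     if not isClose:
--         operations.append((start, len(values)))
--
--     return operations
-- ===== SOURCE B (Python) =====
-- def __operations_time(values):
--     # Run-based scan: jump over each maximal run of equal-keyed (zero / non-zero)
--     # elements at once; emit (start, end) for the non-zero runs.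
--     res = []
--     i = 0
--     n = len(values)
--     while i < n:
--         k = values[i] != 0
--         j = i + 1
--         while j < n and (values[j] != 0) == k:
--             j += 1
--         if k:
--             res.append((i, j))
--         i = j
--     return res
-- ===== Notes on version B (the rewrite author's own statement) =====
-- stated objective: alternative
-- what changed: Replaces A's single-pass boolean state machine (isClose/start flags) with a run-jumping scan that finds each maximal run of equal-keyed elements at once and emits the non-zero runs directly.
import Mathlib
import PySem

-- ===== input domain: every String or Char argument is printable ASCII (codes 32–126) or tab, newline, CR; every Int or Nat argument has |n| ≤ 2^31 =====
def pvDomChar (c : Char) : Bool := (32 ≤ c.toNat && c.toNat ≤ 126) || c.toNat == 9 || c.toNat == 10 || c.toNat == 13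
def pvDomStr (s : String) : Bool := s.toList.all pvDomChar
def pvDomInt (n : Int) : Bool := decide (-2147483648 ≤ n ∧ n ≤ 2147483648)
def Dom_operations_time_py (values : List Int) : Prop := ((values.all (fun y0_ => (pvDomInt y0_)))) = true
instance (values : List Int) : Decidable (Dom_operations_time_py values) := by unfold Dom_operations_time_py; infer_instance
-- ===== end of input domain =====

-- B replaces A's boolean state machine with a run-jumping scan over maximal
-- equal-keyed runs (alternative decomposition, same O(n) cost).


-- ===== PORT A =====
-- state: (operations, isClose, start, i); the for loop over range(len(values))
-- visits the elements in order, so it is folded over the list with the index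
-- counter i carried in the state.
def pvStepA (s : List (Int × Int) × Bool × Int × Int) (v : Int) :
    List (Int × Int) × Bool × Int × Int :=
  match s with
  | (ops, isClose, start, i) =>
    if v == 0 then
      ((if !isClose then ops ++ [(start, i)] else ops), true, start, i + 1)
    else if isClose then (ops, false, i, i + 1)
    else (ops, isClose, start, i + 1)

-- the trailing 'if not isClose: operations.append((start, len(values)))'
def pvFinishA (s : List (Int × Int) × Bool × Int × Int) (n : Int) : List (Int × Int) :=
  match s with
  | (ops, isClose, start, _) => if !isClose then ops ++ [(start, n)] else ops

def operations_time_py (values : List Int) : List (Int × Int) :=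
  pvFinishA (values.foldl pvStepA ([], true, 0, 0)) (values.length : Int)

-- ===== PORT B =====
-- run-jumping scan: each step consumes one maximal run of elements whose key
-- (x != 0) equals the run head's key; the inner 'while j < n and …' is the
-- takeWhile/dropWhile split of the tail.
def pvAltGo (idx : Int) : List Int → List (Int × Int)
  | [] => []
  | x :: xs =>
    let k : Bool := x != 0
    let run := xs.takeWhile (fun y => (y != 0) == k)
    let rest := xs.dropWhile (fun y => (y != 0) == k)
    let L : Int := (run.length : Int) + 1
    if k then (idx, idx + L) :: pvAltGo (idx + L) rest
    else pvAltGo (idx + L) rest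
termination_by l => l.length
decreasing_by
  all_goals exact Nat.lt_succ_of_le (List.length_dropWhile_le _ _)

def operations_time_py_alt (values : List Int) : List (Int × Int) :=
  pvAltGo 0 values

-- ===== PRECONDITION & SPEC =====
def Spec_operations_time_py (values : List Int) (out : List (Int × Int)) : Prop := out = operations_time_py_alt values
instance (values : List Int) (out : List (Int × Int)) : Decidable (Spec_operations_time_py values out) := by unfold Spec_operations_time_py; infer_instance

-- ===== CLAIM (what is proved, stated in full; the proofs are below) =====
def Claim_equal_operations_time_py : Prop := ∀ (values : List Int), Dom_operations_time_py values → Spec_operations_time_py values (operations_time_py values)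

-- ===== LEMMAS AND PROOFS =====

-- skipping a single leading zero equals letting pvAltGo consume it as (part of) a zero run
lemma pvAltGo_zero_cons (i : Int) (xs : List Int) :
    pvAltGo i (0 :: xs) = pvAltGo (i + 1) xs := by
  cases xs with
  | nil => simp [pvAltGo]
  | cons x xs' =>
    by_cases hx : x = 0
    · subst hx
      simp [pvAltGo, List.takeWhile, List.dropWhile]
      ring_nf
    · have h1 : (x != 0) = true := by simp [hx]
      simp [pvAltGo, List.takeWhile, List.dropWhile, h1]

-- C: from a closed state, the rest of A's loop (plus the final append) produces ops ++ pvAltGo i values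
-- O: from an open state with pending start s, it produces ops ++ the pending interval ++ the rest
lemma pvAB (values : List Int) :
    (∀ (ops : List (Int × Int)) (start i : Int),
      pvFinishA (values.foldl pvStepA (ops, true, start, i)) (i + (values.length : Int))
        = ops ++ pvAltGo i values)
    ∧ (∀ (ops : List (Int × Int)) (s i : Int),
      pvFinishA (values.foldl pvStepA (ops, false, s, i)) (i + (values.length : Int))
        = ops ++ (s, i + ((values.takeWhile (fun y => y != 0)).length : Int))
            :: pvAltGo (i + ((values.takeWhile (fun y => y != 0)).length : Int))
                (values.dropWhile (fun y => y != 0))) := by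
  induction values with
  | nil =>
    constructor
    · intro ops start i; simp [pvFinishA, pvAltGo]
    · intro ops s i; simp [pvFinishA, pvAltGo]
  | cons x xs ih =>
    obtain ⟨ihC, ihO⟩ := ih
    constructor
    · intro ops start i
      by_cases hx : x = 0
      · subst hx
        have h := ihC ops start (i + 1)
        simp only [List.foldl_cons, pvStepA, beq_self_eq_true, reduceIte]
        rw [pvAltGo_zero_cons]
        simp only [List.length_cons] at h ⊢
        push_cast at h ⊢
        rw [show i + ((xs.length : Int) + 1) = i + 1 + xs.length by ring]
        exact h
      · have hb : (x == 0) = false := by simp [hx]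
        have h1 : (x != 0) = true := by simp [hx]
        have h := ihO ops i (i + 1)
        simp only [List.foldl_cons, pvStepA, hb, Bool.false_eq_true, if_false, reduceIte]
        simp only [List.length_cons] at h ⊢
        push_cast
        rw [show (i + ((xs.length : Int) + 1)) = i + 1 + xs.length by ring, h]
        -- RHS: unfold pvAltGo on x :: xs
        rw [pvAltGo]
        simp only [h1, reduceIte]
        have hp : (fun y : Int => (y != 0) == true) = (fun y => y != 0) := by
          funext y; simp
        rw [hp]
        ring_nf
    · intro ops s i
      by_cases hx : x = 0
      · subst hx
        have h := ihC (ops ++ [(s, i)]) s (i + 1)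
        simp only [List.foldl_cons, pvStepA, beq_self_eq_true, reduceIte, Bool.not_false]
        simp only [List.length_cons] at h ⊢
        push_cast
        rw [show (i + ((xs.length : Int) + 1)) = i + 1 + xs.length by ring, h]
        simp [List.takeWhile, List.dropWhile, pvAltGo_zero_cons, List.append_assoc]
      · have hb : (x == 0) = false := by simp [hx]
        have h1 : (x != 0) = true := by simp [hx]
        have h := ihO ops s (i + 1)
        simp only [List.foldl_cons, pvStepA, hb, Bool.false_eq_true, if_false, reduceIte, Bool.not_false]
        simp only [List.length_cons] at h ⊢
        push_cast
        rw [show (i + ((xs.length : Int) + 1)) = i + 1 + xs.length by ring, h]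
        simp only [List.takeWhile, List.dropWhile, h1, List.length_cons]
        push_cast
        ring_nf

-- ===== VERDICT (by name: the statement is the Claim_ definition above) =====
theorem operations_time_py_spec : Claim_equal_operations_time_py := by
  intro values _
  unfold Spec_operations_time_py operations_time_py operations_time_py_alt
  have h := (pvAB values).1 [] 0 0
  simpa using h
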